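-- pv_equiv track=rewrite | github.com/YellowTulipShow/-ArticleNotes | python/Case/practice_questions/collect.026.py | new_JudgingTheWeek
-- ===== SOURCE A (Python) =====
-- def new_JudgingTheWeek(week_str):
--     week_str = str(week_str).lower()
--     rule_list = [
--         ['星期一', 'M', ],
--         ['星期二', 'T', 'u'],
--         ['星期三', 'W' ],
--         ['星期四', 'T', 'h'],
--         ['星期五', 'F', ],
--         ['星期六', 'S', 'a'],
--         ['星期天', 'S', 'u'],
--     ]
--     for item in rule_list:
--         if week_str[0] == item[1].lower():
--             if len(week_str) <= 1:
--                 continue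
--             if len(item) <= 2 or week_str[1] == item[2].lower():
--                 return item[0]
--     return '错误参数: ' + week_str
-- ===== SOURCE B (Python) =====
-- def new_JudgingTheWeek(week_str):
--     week_str = str(week_str).lower()
--     first = week_str[0]  # IndexError on empty input, same as the original
--     if len(week_str) <= 1:
--         return '错误参数: ' + week_str
--     one_char = {'m': '星期一', 'w': '星期三', 'f': '星期五'}
--     if first in one_char:
--         return one_char[first]
--     two_char = {'tu': '星期二', 'th': '星期四', 'sa': '星期六', 'su': '星期天'}
--     prefix = week_str[:2]
--     if prefix in two_char:
--         return two_char[prefix]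
--     return '错误参数: ' + week_str
-- ===== Notes on version B (the rewrite author's own statement) =====
-- stated objective: simpler
-- what changed: Replaced the positional rule-list loop (with its continue/len-branches scanned per rule) by one length guard and two direct table lookups keyed by the first character and by the two-character prefix.
import Mathlib
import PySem

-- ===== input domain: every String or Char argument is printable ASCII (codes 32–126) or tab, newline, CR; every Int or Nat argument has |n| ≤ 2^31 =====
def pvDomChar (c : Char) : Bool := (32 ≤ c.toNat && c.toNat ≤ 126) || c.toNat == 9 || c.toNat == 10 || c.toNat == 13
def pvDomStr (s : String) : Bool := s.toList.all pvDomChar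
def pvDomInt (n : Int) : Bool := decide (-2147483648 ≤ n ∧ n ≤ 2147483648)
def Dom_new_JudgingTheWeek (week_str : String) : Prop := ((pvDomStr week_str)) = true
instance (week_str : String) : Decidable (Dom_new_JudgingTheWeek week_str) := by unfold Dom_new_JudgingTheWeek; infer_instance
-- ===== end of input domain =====

-- B replaces A's positional rule-list loop by a length guard plus two direct table
-- lookups (first character, then two-character prefix): simpler, no rule scan.

-- ===== PORT A =====
-- A's rule list: (name, first letter, optional second letter); 'len(item) <= 2' ↔ second = none
def pvRules : List (String × Char × Option Char) :=
  [("星期一", 'M', none), ("星期二", 'T', some 'u'), ("星期三", 'W', none),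
   ("星期四", 'T', some 'h'), ("星期五", 'F', none), ("星期六", 'S', some 'a'),
   ("星期天", 'S', some 'u')]

-- '错误参数: ' + week_str, built on the char-list side (kernel-transparent)
def pvErr (ws : List Char) : String :=
  String.ofList ('错' :: '误' :: '参' :: '数' :: ':' :: ' ' :: ws)

-- A's for-loop; week_str[0] is read each iteration: pyGet? = none is Python's IndexError
-- (outside Pre_), where the port falls through to the error string
def pvLoopA (ws : List Char) : List (String × Char × Option Char) → String
  | [] => pvErr ws
  | (name, c1, c2?) :: rest =>
    match PySem.List.pyGet? ws 0 with
    | none => pvErr ws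
    | some c0 =>
      if c0 = PySem.Chars.lowerChar c1 then
        if PySem.Chars.len ws ≤ 1 then pvLoopA ws rest
        else
          match c2? with
          | none => name
          | some c2 =>
            if PySem.List.pyGet? ws 1 = some (PySem.Chars.lowerChar c2) then name
            else pvLoopA ws rest
      else pvLoopA ws rest

def new_JudgingTheWeek (week_str : String) : String :=
  let ws := PySem.Chars.lower week_str.toList
  pvLoopA ws pvRules

-- ===== PORT B =====
def pvOneChar : PySem.Dict Char String :=
  PySem.Dict.ofList [('m', "星期一"), ('w', "星期三"), ('f', "星期五")]

def pvTwoChar : PySem.Dict String String :=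
  PySem.Dict.ofList [("tu", "星期二"), ("th", "星期四"), ("sa", "星期六"), ("su", "星期天")]

def new_JudgingTheWeek_alt (week_str : String) : String :=
  let ws := PySem.Chars.lower week_str.toList
  match PySem.List.pyGet? ws 0 with      -- first = week_str[0]; none is Python's IndexError, outside Pre_
  | none => pvErr ws
  | some first =>
    if PySem.Chars.len ws ≤ 1 then pvErr ws
    else
      match PySem.Dict.get? pvOneChar first with
      | some v => v
      | none =>
        match PySem.Dict.get? pvTwoChar (String.ofList (PySem.List.slice ws none (some 2))) with
        | some v => v
        | none => pvErr ws

-- ===== PRECONDITION & SPEC =====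
-- Pre_ excludes only the empty string, on which both A and B raise IndexError at week_str[0].
def Pre_new_JudgingTheWeek (week_str : String) : Prop := week_str.toList ≠ []
instance (week_str : String) : Decidable (Pre_new_JudgingTheWeek week_str) := by unfold Pre_new_JudgingTheWeek; infer_instance

def pvWitness_new_JudgingTheWeek : String := "Tu"

def Spec_new_JudgingTheWeek (week_str : String) (out : String) : Prop := out = new_JudgingTheWeek_alt week_str
instance (week_str : String) (out : String) : Decidable (Spec_new_JudgingTheWeek week_str out) := by unfold Spec_new_JudgingTheWeek; infer_instance

-- ===== CLAIM (what is proved, stated in full; the proofs are below) =====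
def Claim_equal_new_JudgingTheWeek : Prop := ∀ (week_str : String), Dom_new_JudgingTheWeek week_str → Pre_new_JudgingTheWeek week_str → Spec_new_JudgingTheWeek week_str (new_JudgingTheWeek week_str)

-- ===== LEMMAS AND PROOFS =====

-- on a one-character input every rule hits 'continue' or the mismatch branch, so A falls through
theorem pvLoopA_singleton (c : Char) : ∀ rs, pvLoopA [c] rs = pvErr [c]
  | [] => rfl
  | (name, c1, c2?) :: rest => by
    have hlen : PySem.Chars.len [c] ≤ 1 := by simp [PySem.Chars.len]
    simp only [pvLoopA, PySem.List.pyGet?_zero_cons, if_pos hlen]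
    split_ifs <;> exact pvLoopA_singleton c rest

-- core: on any nonempty char list, A's rule-list loop equals B's guard-plus-two-lookups
set_option maxRecDepth 8192 in
theorem pv_main (c : Char) (cs : List Char) :
    pvLoopA (c :: cs) pvRules =
      (if PySem.Chars.len (c :: cs) ≤ 1 then pvErr (c :: cs)
       else match PySem.Dict.get? pvOneChar c with
       | some v => v
       | none =>
         match PySem.Dict.get? pvTwoChar (String.ofList (PySem.List.slice (c :: cs) none (some 2))) with
         | some v => v
         | none => pvErr (c :: cs)) := by
  cases cs with
  | nil =>
    rw [pvLoopA_singleton, if_pos (show PySem.Chars.len [c] ≤ 1 by simp [PySem.Chars.len])]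
  | cons d ds =>
    have hlen : ¬ PySem.Chars.len (c :: d :: ds) ≤ 1 := by
      simp [PySem.Chars.len]
    rw [if_neg hlen]
    have hslice : PySem.List.slice (c :: d :: ds) none (some 2) = [c, d] := by
      rw [PySem.List.slice_to _ (by norm_num)]; rfl
    rw [hslice]
    have h1 : PySem.List.pyGet? (c :: d :: ds) 1 = some d := by
      simp [PySem.List.pyGet?, PySem.List.pyIdx?]
    have key : ∀ (a b x y : Char), (String.ofList [a,b] = String.ofList [x,y]) ↔ (x = a ∧ y = b) := by
      intro a b x y; rw [String.ofList_inj]; simp; tauto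
    have e1 : pvOneChar = PySem.Dict.mk [('m', "星期一"), ('w', "星期三"), ('f', "星期五")] := by decide
    have e2 : pvTwoChar = PySem.Dict.mk [("tu", "星期二"), ("th", "星期四"), ("sa", "星期六"), ("su", "星期天")] := by decide
    simp only [pvRules, pvLoopA, PySem.List.pyGet?_zero_cons, if_neg hlen, h1, e1, e2]
    simp only [PySem.Dict.get?_mk_cons]
    simp only [show PySem.Chars.lowerChar 'M' = 'm' from by decide,
      show PySem.Chars.lowerChar 'T' = 't' from by decide,
      show PySem.Chars.lowerChar 'W' = 'w' from by decide,
      show PySem.Chars.lowerChar 'F' = 'f' from by decide,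
      show PySem.Chars.lowerChar 'S' = 's' from by decide,
      show PySem.Chars.lowerChar 'u' = 'u' from by decide,
      show PySem.Chars.lowerChar 'h' = 'h' from by decide,
      show PySem.Chars.lowerChar 'a' = 'a' from by decide]
    have g0 : ∀ x : Char, (PySem.Dict.mk ([] : List (Char × String))).get? x = none := fun _ => rfl
    have g0s : ∀ x : String, (PySem.Dict.mk ([] : List (String × String))).get? x = none := fun _ => rfl
    have knu : ∀ (a b x y : Char), x ≠ a → (String.ofList [a,b] = String.ofList [x,y]) = False := by
      intro a b x y hx; simp [key, hx]
    have knv : ∀ (a b x y : Char), y ≠ b → (String.ofList [a,b] = String.ofList [x,y]) = False := by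
      intro a b x y hy; simp [key]; exact fun _ => hy
    by_cases hm : c = 'm'
    · subst hm; simp
    by_cases hw : c = 'w'
    · subst hw; simp
    by_cases hf : c = 'f'
    · subst hf; simp
    by_cases ht : c = 't'
    · subst ht
      by_cases hu : d = 'u'
      · subst hu; simp [g0, hm]
      by_cases hh : d = 'h'
      · subst hh
        simp [g0, hm, hw, hu,
          show ("tu":String) = String.ofList ['t','u'] from rfl,
          show ("th":String) = String.ofList ['t','h'] from rfl]
      · simp [g0, g0s, hm, hw, hf, hu, hh,
          show ("tu":String) = String.ofList ['t','u'] from rfl,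
          show ("th":String) = String.ofList ['t','h'] from rfl,
          show ("sa":String) = String.ofList ['s','a'] from rfl,
          show ("su":String) = String.ofList ['s','u'] from rfl, knu, knv]
    by_cases hs : c = 's'
    · subst hs
      by_cases ha : d = 'a'
      · subst ha; simp [g0, hm, hw, hf, ht,
          show ("tu":String) = String.ofList ['t','u'] from rfl,
          show ("th":String) = String.ofList ['t','h'] from rfl,
          show ("sa":String) = String.ofList ['s','a'] from rfl]
      by_cases hu : d = 'u'
      · subst hu; simp [g0, hm, hw, hf, ht, ha,
          show ("tu":String) = String.ofList ['t','u'] from rfl,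
          show ("th":String) = String.ofList ['t','h'] from rfl,
          show ("sa":String) = String.ofList ['s','a'] from rfl,
          show ("su":String) = String.ofList ['s','u'] from rfl]
      · simp [g0, g0s, hm, hw, hf, ht, ha, hu,
          show ("tu":String) = String.ofList ['t','u'] from rfl,
          show ("th":String) = String.ofList ['t','h'] from rfl,
          show ("sa":String) = String.ofList ['s','a'] from rfl,
          show ("su":String) = String.ofList ['s','u'] from rfl, knu, knv]
    · simp [g0, g0s, hm, hw, hf, ht, hs, Ne.symm hm, Ne.symm hw, Ne.symm hf,
        show ("tu":String) = String.ofList ['t','u'] from rfl,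
        show ("th":String) = String.ofList ['t','h'] from rfl,
        show ("sa":String) = String.ofList ['s','a'] from rfl,
        show ("su":String) = String.ofList ['s','u'] from rfl, knu]

-- ===== VERDICT (by name: the statement is the Claim_ definition above) =====
theorem new_JudgingTheWeek_spec : Claim_equal_new_JudgingTheWeek := by
  intro s _ hpre
  unfold Spec_new_JudgingTheWeek new_JudgingTheWeek new_JudgingTheWeek_alt
  cases h : PySem.Chars.lower s.toList with
  | nil =>
    exfalso
    have h' : s.toList.map PySem.Chars.lowerChar = [] := h
    exact hpre (List.map_eq_nil_iff.mp h')
  | cons c cs =>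
    simp only [PySem.List.pyGet?_zero_cons]
    exact pv_main c cs
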